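-- pv_equiv track=rewrite | github.com/stefan-scott/CS20_Winter2025 | 18 Accumulator Exercises.py | teen_talk
-- ===== SOURCE A (Python) =====
-- def teen_talk(str):
--     result = ""
--     for char in str:
--         if char == " ":
--             result = result + " like "
--         else:
--             result += char
--     return result
-- ===== SOURCE B (Python) =====
-- def teen_talk(str):
--     return " like ".join(str.split(" "))
-- ===== Notes on version B (the rewrite author's own statement) =====
-- stated objective: idiomatic
-- what changed: Replaces the character-by-character accumulator-and-branch scan with tokenize-then-rejoin: split the string on a single space and join the segments with the separator word, one join instead of repeated string concatenation.
import Mathlib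
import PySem

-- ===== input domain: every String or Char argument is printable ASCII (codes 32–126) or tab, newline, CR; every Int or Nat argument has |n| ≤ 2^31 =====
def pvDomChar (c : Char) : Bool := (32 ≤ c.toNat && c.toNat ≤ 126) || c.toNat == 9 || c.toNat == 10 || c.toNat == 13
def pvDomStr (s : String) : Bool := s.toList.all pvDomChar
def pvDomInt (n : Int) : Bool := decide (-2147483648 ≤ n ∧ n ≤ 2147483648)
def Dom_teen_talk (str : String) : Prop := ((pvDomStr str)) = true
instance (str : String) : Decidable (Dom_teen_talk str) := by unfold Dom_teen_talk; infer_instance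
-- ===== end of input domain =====

-- B replaces A's char-by-char accumulator scan with split-on-space + " like ".join (more idiomatic).


-- ===== PORT A =====
def teen_talk (str : String) : String :=
  str.toList.foldl
    (fun result char => if char == ' ' then result ++ " like " else result.push char) ""

-- ===== PORT B =====
def teen_talk_alt (str : String) : String :=
  PySem.Str.join " like " ((PySem.Str.split? str " ").getD [])

-- ===== PRECONDITION & SPEC =====
def Spec_teen_talk (str : String) (out : String) : Prop := out = teen_talk_alt str
instance (str : String) (out : String) : Decidable (Spec_teen_talk str out) := by unfold Spec_teen_talk; infer_instance

-- ===== CLAIM (what is proved, stated in full; the proofs are below) =====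
def Claim_equal_teen_talk : Prop := ∀ (str : String), Dom_teen_talk str → Spec_teen_talk str (teen_talk str)

-- ===== LEMMAS AND PROOFS =====

-- prepend a prefix onto the first piece
def pvConsHead (p : List Char) : List (List Char) → List (List Char)
  | [] => [p]
  | h :: t => (p ++ h) :: t

-- structural single-space split
def pvSplit1 : List Char → List (List Char)
  | [] => [[]]
  | c :: rest => if c = ' ' then [] :: pvSplit1 rest else pvConsHead [c] (pvSplit1 rest)

theorem pvSplit1_ne_nil (cs : List Char) : pvSplit1 cs ≠ [] := by
  cases cs with
  | nil => simp [pvSplit1]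
  | cons c rest =>
    simp only [pvSplit1]
    split
    · simp
    · cases h : pvSplit1 rest <;> simp [pvConsHead]

theorem pvJoin_consHead (sep p : List Char) (l : List (List Char)) (h : l ≠ []) :
    PySem.Chars.join sep (pvConsHead p l) = p ++ PySem.Chars.join sep l := by
  cases l with
  | nil => exact absurd rfl h
  | cons a t =>
    cases t with
    | nil => simp [pvConsHead, PySem.Chars.join, List.intercalate]
    | cons b t' => simp [pvConsHead, PySem.Chars.join, List.intercalate, List.intersperse]

theorem pvJoin_cons (sep a : List Char) (l : List (List Char)) (h : l ≠ []) :
    PySem.Chars.join sep (a :: l) = a ++ sep ++ PySem.Chars.join sep l := by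
  cases l with
  | nil => exact absurd rfl h
  | cons b t =>
    simp [PySem.Chars.join, List.intercalate, List.intersperse]

theorem pvGo_eq (cs : List Char) : ∀ (fuel : Nat) (cur : List Char) (acc : List (List Char)),
    cs.length < fuel →
    PySem.Chars.splitOn.go [' '] fuel cs cur acc
      = acc.reverse ++ pvConsHead cur.reverse (pvSplit1 cs) := by
  induction cs with
  | nil =>
    intro fuel cur acc h
    cases fuel with
    | zero => omega
    | succ f => simp [PySem.Chars.splitOn.go, pvSplit1, pvConsHead]
  | cons c rest ih =>
    intro fuel cur acc h
    cases fuel with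
    | zero => omega
    | succ f =>
      rw [PySem.Chars.splitOn.go.eq_def]
      dsimp only
      by_cases hc : c = ' '
      · subst hc
        have hpre : [' '].isPrefixOf (' ' :: rest) = true := by simp [List.isPrefixOf]
        rw [if_pos hpre]
        simp only [List.length_cons] at h
        simp only [List.length_singleton, List.drop_one, List.tail_cons]
        rw [ih f [] (cur.reverse :: acc) (by omega)]
        have hne := pvSplit1_ne_nil rest
        cases hr : pvSplit1 rest with
        | nil => exact absurd hr hne
        | cons a t => simp [pvSplit1, pvConsHead, hr]
      · have hpre : [' '].isPrefixOf (c :: rest) = false := by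
          simp [List.isPrefixOf]; exact fun hcontra => hc hcontra.symm
        rw [if_neg (by simp [hpre])]
        simp only [List.length_cons] at h
        rw [ih f (c :: cur) acc (by omega)]
        have hne := pvSplit1_ne_nil rest
        cases hr : pvSplit1 rest with
        | nil => exact absurd hr hne
        | cons a t => simp [pvSplit1, hc, pvConsHead, hr]

theorem pvSplitOn_eq (cs : List Char) : PySem.Chars.splitOn cs [' '] = pvSplit1 cs := by
  rw [PySem.Chars.splitOn, pvGo_eq cs (cs.length + 1) [] [] (by omega)]
  have hne := pvSplit1_ne_nil cs
  cases hr : pvSplit1 cs with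
  | nil => exact absurd hr hne
  | cons a t => simp [pvConsHead]

-- A's fold, characterised at the character-list level
theorem pvFoldA (cs : List Char) : ∀ (r : String),
    (cs.foldl (fun result char =>
        if char == ' ' then result ++ " like " else result.push char) r).toList
      = r.toList ++ PySem.Chars.join (" like ".toList) (pvSplit1 cs) := by
  induction cs with
  | nil => intro r; simp [pvSplit1, PySem.Chars.join, List.intercalate]
  | cons c rest ih =>
    intro r
    by_cases hc : c = ' '
    · subst hc
      simp only [List.foldl_cons, beq_self_eq_true, if_pos]
      rw [ih (r ++ " like ")]
      rw [show pvSplit1 (' ' :: rest) = [] :: pvSplit1 rest from by simp [pvSplit1]]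
      rw [pvJoin_cons _ _ _ (pvSplit1_ne_nil rest)]
      simp
    · simp only [List.foldl_cons]
      rw [if_neg (by simpa using hc)]
      rw [ih (r.push c)]
      rw [show pvSplit1 (c :: rest) = pvConsHead [c] (pvSplit1 rest) from by
        simp [pvSplit1, hc]]
      rw [pvJoin_consHead _ _ _ (pvSplit1_ne_nil rest)]
      simp

-- ===== VERDICT (by name: the statement is the Claim_ definition above) =====
theorem teen_talk_spec : Claim_equal_teen_talk := by
  intro str _
  show teen_talk str = teen_talk_alt str
  have hsplit : PySem.Str.split? str " "
      = some ((PySem.Chars.splitOn str.toList [' ']).map String.ofList) := by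
    simp [PySem.Str.split?, PySem.Chars.split?]
  have hA : (teen_talk str).toList
      = PySem.Chars.join (" like ".toList) (pvSplit1 str.toList) := by
    unfold teen_talk
    rw [pvFoldA str.toList ""]
    simp
  have hB : (teen_talk_alt str).toList
      = PySem.Chars.join (" like ".toList) (pvSplit1 str.toList) := by
    unfold teen_talk_alt
    rw [hsplit]
    simp [PySem.Str.join, pvSplitOn_eq, List.map_map, Function.comp_def, String.toList_ofList]
  have : (teen_talk str).toList = (teen_talk_alt str).toList := hA.trans hB.symm
  calc teen_talk str = String.ofList (teen_talk str).toList := by simp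
    _ = String.ofList (teen_talk_alt str).toList := by rw [this]
    _ = teen_talk_alt str := by simp
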